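-- pv_equiv track=rewrite | github.com/Dhivakar2005/DentalVoiceAgent | server.py | _resolve_model
-- ===== SOURCE A (Python) =====
-- def _resolve_model(preferred: str, available: list) -> str:
--     """
--     Return 'preferred' if downloaded, otherwise fall back to the best
--     available model so the server never crashes at startup.
--     """
--     # Exact match
--     if preferred in available:
--         return preferred
--     # Prefix match (e.g. 'aya-expanse:8b' matches 'aya-expanse:8b-q4_0')
--     for m in available:
--         if m.startswith(preferred.split(":")[0]):
--             return m
--     # Fallback priority: phi3 > qwen > first available
--     for fallback in ["phi3:mini", "qwen3.5:0.8b"]: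
--         if any(m.startswith(fallback.split(":")[0]) for m in available):
--             for m in available:
--                 if m.startswith(fallback.split(":")[0]):
--                     return m
--     return available[0] if available else preferred
-- ===== SOURCE B (Python) =====
-- def _resolve_model(preferred: str, available: list) -> str:
--     """Single pass: score every model once, return the first model with the
--     lowest score (argmin with first-occurrence tie-break)."""
--     prefix = preferred.split(":")[0]
--
--     def rank(m):
--         if m == preferred:
--             return 0
--         if m.startswith(prefix):
--             return 1
--         if m.startswith("phi3"):
--             return 2
--         if m.startswith("qwen3.5"):
--             return 3
--         return 4
--
--     best = None  # (rank, model)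
--     for m in available:
--         r = rank(m)
--         if best is None or r < best[0]:
--             best = (r, m)
--     return best[1] if best is not None else preferred
-- ===== Notes on version B (the rewrite author's own statement) =====
-- stated objective: faster
-- what changed: Replaces A's staged scans (membership test, prefix scan, any()+rescan fallback loops, head default) by a single pass that scores every model with a numeric rank and returns the first model attaining the minimum rank (argmin accumulator); the colon-prefix is computed once instead of once per element, and the empty-list default falls out of the same accumulator.
import Mathlib
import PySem

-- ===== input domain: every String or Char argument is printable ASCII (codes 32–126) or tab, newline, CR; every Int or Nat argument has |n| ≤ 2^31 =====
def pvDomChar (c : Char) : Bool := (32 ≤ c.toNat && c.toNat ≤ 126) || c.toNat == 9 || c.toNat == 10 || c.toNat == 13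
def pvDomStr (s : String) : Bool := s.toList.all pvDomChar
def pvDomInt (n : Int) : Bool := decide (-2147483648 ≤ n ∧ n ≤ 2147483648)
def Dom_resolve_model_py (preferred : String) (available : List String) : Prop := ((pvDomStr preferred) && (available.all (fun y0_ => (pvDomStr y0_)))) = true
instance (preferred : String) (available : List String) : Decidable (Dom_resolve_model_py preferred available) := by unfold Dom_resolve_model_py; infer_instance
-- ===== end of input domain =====

-- B replaces A's staged scans by one pass scoring each model and taking the first argmin; proved to return the same value.

-- s.split(":")[0]  (split? with sep ":" never returns none, and the split list is never empty)
def pvColonPrefix (s : String) : String := ((PySem.Str.split? s ":").getD []).headD ""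

-- ===== PORT A =====
-- A's outer fallback loop: for each fallback, an any() test then a rescan returning the first match
def resolve_model_py_fbLoop (available : List String) : List String → Option String
  | [] => none
  | fb :: rest =>
    if available.any (fun m => PySem.Str.startswith m (pvColonPrefix fb)) then
      match available.find? (fun m => PySem.Str.startswith m (pvColonPrefix fb)) with
      | some m => some m
      | none => resolve_model_py_fbLoop available rest
    else resolve_model_py_fbLoop available rest

def resolve_model_py (preferred : String) (available : List String) : String :=
  if available.contains preferred then preferred
  else
    match available.find? (fun m => PySem.Str.startswith m (pvColonPrefix preferred)) with
    | some m => m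
    | none =>
      match resolve_model_py_fbLoop available ["phi3:mini", "qwen3.5:0.8b"] with
      | some m => m
      | none => match available with
                | [] => preferred
                | x :: _ => x

-- ===== PORT B =====
-- numeric score of one model (Source B's rank)
def pvRank (preferred : String) (m : String) : Nat :=
  if m == preferred then 0
  else if PySem.Str.startswith m (pvColonPrefix preferred) then 1
  else if PySem.Str.startswith m "phi3" then 2
  else if PySem.Str.startswith m "qwen3.5" then 3
  else 4

-- Source B's single loop: best-so-far accumulator (rank, model), strict improvement only
def resolve_model_py_alt_loop (preferred : String) (best : Option (Nat × String)) : List String → Option (Nat × String)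
  | [] => best
  | m :: rest =>
    let r := pvRank preferred m
    let best' : Option (Nat × String) :=
      match best with
      | none => some (r, m)
      | some (rb, mb) => if r < rb then some (r, m) else some (rb, mb)
    resolve_model_py_alt_loop preferred best' rest

def resolve_model_py_alt (preferred : String) (available : List String) : String :=
  match resolve_model_py_alt_loop preferred none available with
  | some (_, m) => m
  | none => preferred

-- ===== PRECONDITION & SPEC =====
def Spec_resolve_model_py (preferred : String) (available : List String) (out : String) : Prop := out = resolve_model_py_alt preferred available
instance (preferred : String) (available : List String) (out : String) : Decidable (Spec_resolve_model_py preferred available out) := by unfold Spec_resolve_model_py; infer_instance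

-- ===== CLAIM (what is proved, stated in full; the proofs are below) =====
def Claim_equal_resolve_model_py : Prop := ∀ (preferred : String) (available : List String), Dom_resolve_model_py preferred available → Spec_resolve_model_py preferred available (resolve_model_py preferred available)

-- ===== LEMMAS AND PROOFS =====

-- staged search: first model of rank 0, else of rank 1, …, else of rank rb-1
def pvStaged (preferred : String) (l : List String) : Nat → Option String
  | 0 => none
  | k + 1 =>
    match pvStaged preferred l k with
    | some m => some m
    | none => l.find? (fun x => pvRank preferred x == k)

theorem pvRank_lt5 (preferred m : String) : pvRank preferred m < 5 := by
  unfold pvRank; split_ifs <;> omega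

theorem pvStaged_nil (preferred : String) (rb : Nat) : pvStaged preferred [] rb = none := by
  induction rb with
  | zero => rfl
  | succ k ih => simp [pvStaged, ih]

theorem pvStaged_cons (preferred m : String) (rest : List String) (rb : Nat) :
    pvStaged preferred (m :: rest) rb =
      if pvRank preferred m < rb then some ((pvStaged preferred rest (pvRank preferred m)).getD m)
      else pvStaged preferred rest rb := by
  induction rb with
  | zero => simp [pvStaged]
  | succ k ih =>
    rcases Nat.lt_trichotomy (pvRank preferred m) k with h | h | h
    · rw [if_pos (by omega)] at ih
      rw [pvStaged, ih, if_pos (show pvRank preferred m < k + 1 by omega)]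
    · subst h
      rw [if_neg (by omega)] at ih
      rw [pvStaged, ih, if_pos (show pvRank preferred m < pvRank preferred m + 1 by omega)]
      cases hr : pvStaged preferred rest (pvRank preferred m) with
      | some m' => simp
      | none =>
        simp only [Option.getD_none]
        rw [List.find?_cons_of_pos (by simp)]
    · rw [if_neg (by omega)] at ih
      rw [pvStaged, ih, if_neg (by omega), pvStaged]
      rw [List.find?_cons_of_neg (by simp; omega)]

theorem alt_loop_some (preferred : String) (l : List String) :
    ∀ (rb : Nat) (mb : String),
      resolve_model_py_alt_loop preferred (some (rb, mb)) l =
        match pvStaged preferred l rb with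
        | none => some (rb, mb)
        | some m' => some (pvRank preferred m', m') := by
  induction l with
  | nil => intro rb mb; simp [resolve_model_py_alt_loop, pvStaged_nil]
  | cons m rest ih =>
    intro rb mb
    rw [pvStaged_cons]
    by_cases h : pvRank preferred m < rb
    · rw [if_pos h]
      show resolve_model_py_alt_loop preferred
          (if pvRank preferred m < rb then some (pvRank preferred m, m) else some (rb, mb)) rest = _
      rw [if_pos h, ih]
      cases hr : pvStaged preferred rest (pvRank preferred m) with
      | none => simp
      | some m' => simp
    · rw [if_neg h]
      show resolve_model_py_alt_loop preferred
          (if pvRank preferred m < rb then some (pvRank preferred m, m) else some (rb, mb)) rest = _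
      rw [if_neg h, ih]

-- B's result on a nonempty list is the staged winner with the full range of ranks
theorem alt_eq_staged (preferred m : String) (rest : List String) :
    pvStaged preferred (m :: rest) 5 = some (resolve_model_py_alt preferred (m :: rest)) := by
  rw [pvStaged_cons, if_pos (pvRank_lt5 preferred m)]
  show _ = some (match resolve_model_py_alt_loop preferred none (m :: rest) with
                 | some (_, x) => x | none => preferred)
  show _ = some (match resolve_model_py_alt_loop preferred (some (pvRank preferred m, m)) rest with
                 | some (_, x) => x | none => preferred)
  rw [alt_loop_some]
  cases hr : pvStaged preferred rest (pvRank preferred m) with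
  | none => simp
  | some m' => simp

theorem find_beq_of_mem {l : List String} {p : String} (h : p ∈ l) :
    l.find? (fun m => m == p) = some p := by
  induction l with
  | nil => simp at h
  | cons x xs ih =>
    by_cases hx : x = p
    · subst hx; simp
    · rw [List.find?_cons_of_neg (by simpa using hx)]
      rcases List.mem_cons.mp h with h' | h'
      · exact absurd h'.symm hx
      · exact ih h'

theorem find_beq_of_not_mem {l : List String} {p : String} (h : p ∉ l) :
    l.find? (fun m => m == p) = none := by
  rw [List.find?_eq_none]
  intro x hx hbeq
  exact h (by simpa using (eq_of_beq hbeq) ▸ hx)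

theorem find?_congr_mem {p q : String → Bool} {l : List String}
    (h : ∀ x ∈ l, p x = q x) : l.find? p = l.find? q := by
  induction l with
  | nil => rfl
  | cons x xs ih =>
    have hx := h x (by simp)
    by_cases hp : p x
    · rw [List.find?_cons_of_pos hp, List.find?_cons_of_pos (hx ▸ hp)]
    · rw [List.find?_cons_of_neg hp, List.find?_cons_of_neg (by rw [← hx]; exact hp),
        ih (fun y hy => h y (by simp [hy]))]

-- A's any()+rescan block collapses: any holds iff the rescan's find? is some
theorem any_eq_find_isSome (l : List String) (p : String → Bool) :
    l.any p = (l.find? p).isSome := by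
  induction l with
  | nil => simp
  | cons x xs ih => by_cases hx : p x <;> simp [hx, ih]

theorem rank_eq_zero (preferred x : String) : (pvRank preferred x == 0) = (x == preferred) := by
  unfold pvRank; split_ifs <;> simp_all

theorem resolve_model_py_spec : Claim_equal_resolve_model_py := by
  intro preferred available _
  unfold Spec_resolve_model_py
  cases available with
  | nil =>
    simp [resolve_model_py, resolve_model_py_alt, resolve_model_py_alt_loop,
      resolve_model_py_fbLoop]
  | cons m rest =>
    -- it suffices to show pvStaged … 5 = some (A's result)
    have halt := alt_eq_staged preferred m rest
    suffices h : pvStaged preferred (m :: rest) 5 = some (resolve_model_py preferred (m :: rest)) by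
      exact Option.some.inj (h.symm.trans halt)
    have h5 : (5 : Nat) = 4 + 1 := rfl
    have h4 : (4 : Nat) = 3 + 1 := rfl
    have h3 : (3 : Nat) = 2 + 1 := rfl
    have h2 : (2 : Nat) = 1 + 1 := rfl
    have hfind0 : (m :: rest).find? (fun x => pvRank preferred x == 0)
        = (m :: rest).find? (fun x => x == preferred) := by
      exact find?_congr_mem (fun x _ => rank_eq_zero preferred x)
    unfold resolve_model_py
    by_cases hc : (m :: rest).contains preferred
    · rw [if_pos hc]
      have : (m :: rest).find? (fun x => pvRank preferred x == 0) = some preferred := by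
        rw [hfind0]; exact find_beq_of_mem (by simpa using hc)
      rw [h5, pvStaged, h4, pvStaged, h3, pvStaged, h2, pvStaged, pvStaged, pvStaged, this]
    · rw [if_neg hc]
      have h0 : (m :: rest).find? (fun x => pvRank preferred x == 0) = none := by
        rw [hfind0]; exact find_beq_of_not_mem (by simpa using hc)
      have hpm : preferred ∉ (m :: rest) := by simpa using hc
      have hmem0 : ∀ x ∈ (m :: rest), ¬(x = preferred) := fun x hx he => hpm (he ▸ hx)
      have hr1 : ∀ x ∈ (m :: rest),
          (pvRank preferred x == 1) = PySem.Str.startswith x (pvColonPrefix preferred) := by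
        intro x hx
        unfold pvRank
        rw [if_neg (by simpa using hmem0 x hx)]
        split_ifs <;> simp_all
      rw [h5, pvStaged, h4, pvStaged, h3, pvStaged, h2, pvStaged, pvStaged, pvStaged, h0]
      rw [find?_congr_mem hr1]
      cases hf1 : (m :: rest).find? (fun x => PySem.Str.startswith x (pvColonPrefix preferred)) with
      | some m1 => rfl
      | none =>
        have hmem1 : ∀ x ∈ (m :: rest), ¬(PySem.Str.startswith x (pvColonPrefix preferred) = true) := by
          intro x hx
          have := List.find?_eq_none.mp hf1 x hx
          simpa using this
        have hr2 : ∀ x ∈ (m :: rest),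
            (pvRank preferred x == 2) = PySem.Str.startswith x "phi3" := by
          intro x hx
          unfold pvRank
          rw [if_neg (by simpa using hmem0 x hx),
            if_neg (by simpa using hmem1 x hx)]
          split_ifs <;> simp_all
        rw [find?_congr_mem hr2]
        have e1 : pvColonPrefix "phi3:mini" = "phi3" := by decide
        have e2 : pvColonPrefix "qwen3.5:0.8b" = "qwen3.5" := by decide
        simp only [resolve_model_py_fbLoop, e1, e2, any_eq_find_isSome]
        cases hf2 : (m :: rest).find? (fun x => PySem.Str.startswith x "phi3") with
        | some m2 => simp
        | none =>
          simp only [Option.isSome_none, Bool.false_eq_true, if_false]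
          have hmem2 : ∀ x ∈ (m :: rest), ¬(PySem.Str.startswith x "phi3" = true) := by
            intro x hx; simpa using List.find?_eq_none.mp hf2 x hx
          have hr3 : ∀ x ∈ (m :: rest),
              (pvRank preferred x == 3) = PySem.Str.startswith x "qwen3.5" := by
            intro x hx
            unfold pvRank
            rw [if_neg (by simpa using hmem0 x hx),
              if_neg (by simpa using hmem1 x hx),
              if_neg (by simpa using hmem2 x hx)]
            split_ifs <;> simp_all
          rw [find?_congr_mem hr3]
          cases hf3 : (m :: rest).find? (fun x => PySem.Str.startswith x "qwen3.5") with
          | some m3 => simp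
          | none =>
            simp only [Option.isSome_none, Bool.false_eq_true, if_false]
            have hmem3 : ∀ x ∈ (m :: rest), ¬(PySem.Str.startswith x "qwen3.5" = true) := by
              intro x hx; simpa using List.find?_eq_none.mp hf3 x hx
            have hm4 : pvRank preferred m = 4 := by
              unfold pvRank
              rw [if_neg (by simpa using hmem0 m (by simp)),
                if_neg (by simpa using hmem1 m (by simp)),
                if_neg (by simpa using hmem2 m (by simp)),
                if_neg (by simpa using hmem3 m (by simp))]
            rw [List.find?_cons_of_pos (by simp [hm4])]
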